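-- pv_equiv track=rewrite | github.com/hlpostman/Challenges | multiply_without_arithmetic_operators/multiply_without_arithmetic_operators.py | add_without_arithmetic_operators
-- ===== SOURCE A (Python) =====
-- def add_without_arithmetic_operators(a, b):
--     """ Takes two unsigned integers and returns their sum without using arithmetic operators.
--         Args:
--             a, b: both unsigned integers
--         Returns:
--             an unsigned integer the sum of a and b
--         Raises:
--             TypeError: the arguments received for a and b are not both integers
--     """
--     if a < 0 or b < 0:
--         raise ValueError("Both arguments must be non-negative.")
--     while b != 0:
--         carry = a & b # Mask of the bits that will necessitate carrying
--         a ^= b # Mask of the bits that, at this iteration, can be added into a from b without carrying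
--         b = carry << 1 # Carry all of the carry bits one place to the left
--     return a
-- ===== SOURCE B (Python) =====
-- def add_without_arithmetic_operators(a, b):
--     """Ripple-carry adder: walk bit positions once with an explicit 1-bit carry."""
--     if a < 0 or b < 0:
--         raise ValueError("Both arguments must be non-negative.")
--     result = 0
--     carry = 0
--     i = 0
--     while (a >> i) or (b >> i) or carry:
--         bit_a = (a >> i) & 1
--         bit_b = (b >> i) & 1
--         s = bit_a ^ bit_b ^ carry
--         result |= s << i
--         carry = (bit_a & bit_b) | (bit_a & carry) | (bit_b & carry)
--         i += 1
--     return result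
-- ===== Notes on version B (the rewrite author's own statement) =====
-- stated objective: alternative
-- what changed: Replaced A's whole-word XOR/AND carry-propagation loop with a ripple-carry adder that scans bit positions once, maintaining an explicit one-bit carry and OR-ing each sum bit into the result.
import Mathlib
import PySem

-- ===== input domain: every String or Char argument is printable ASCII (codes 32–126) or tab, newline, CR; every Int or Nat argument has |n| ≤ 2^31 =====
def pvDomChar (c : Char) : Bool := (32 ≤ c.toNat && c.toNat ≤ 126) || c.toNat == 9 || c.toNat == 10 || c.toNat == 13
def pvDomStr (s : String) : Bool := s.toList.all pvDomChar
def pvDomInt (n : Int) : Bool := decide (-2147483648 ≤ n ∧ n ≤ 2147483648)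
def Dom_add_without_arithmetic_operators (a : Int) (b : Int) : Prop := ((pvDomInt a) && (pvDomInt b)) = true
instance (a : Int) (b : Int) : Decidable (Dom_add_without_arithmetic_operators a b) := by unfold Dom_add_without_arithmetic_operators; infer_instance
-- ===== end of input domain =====

-- B replaces A's whole-word XOR/AND carry-sweep loop by a ripple-carry adder that walks
-- bit positions once with an explicit one-bit carry (alternative algorithm, same cost).

-- ===== PORT A =====
-- A's `while b != 0` loop; the fuel argument (64) only makes the recursion total:
-- on the admitted domain (0 ≤ a, b ≤ 2^31) the loop ends well within 64 iterations.
def pvLoopA : Nat → Int → Int → Int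
  | 0, a, _ => a
  | fuel + 1, a, b =>
    if b ≠ 0 then
      let carry := PySem.Int.band a b
      pvLoopA fuel (PySem.Int.bxor a b) (carry <<< (1 : Nat))
    else a

def add_without_arithmetic_operators (a : Int) (b : Int) : Int :=
  pvLoopA 64 a b

-- ===== PORT B =====
-- B's `while (a>>i) or (b>>i) or carry` loop; fuel 64 again only for totality.
def pvLoopB : Nat → Int → Int → Int → Int → Nat → Int
  | 0, _, _, result, _, _ => result
  | fuel + 1, a, b, result, carry, i =>
    if (a >>> i) ≠ 0 ∨ (b >>> i) ≠ 0 ∨ carry ≠ 0 then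
      let bitA := PySem.Int.band (a >>> i) 1
      let bitB := PySem.Int.band (b >>> i) 1
      let s := PySem.Int.bxor (PySem.Int.bxor bitA bitB) carry
      let result' := PySem.Int.bor result (s <<< i)
      let carry' := PySem.Int.bor (PySem.Int.bor (PySem.Int.band bitA bitB) (PySem.Int.band bitA carry)) (PySem.Int.band bitB carry)
      pvLoopB fuel a b result' carry' (i + 1)
    else result

def add_without_arithmetic_operators_alt (a : Int) (b : Int) : Int :=
  pvLoopB 64 a b 0 0 0

-- ===== PRECONDITION & SPEC =====
-- A raises ValueError when a < 0 or b < 0; those inputs are excluded.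
def Pre_add_without_arithmetic_operators (a : Int) (b : Int) : Prop := 0 ≤ a ∧ 0 ≤ b
instance (a : Int) (b : Int) : Decidable (Pre_add_without_arithmetic_operators a b) := by
  unfold Pre_add_without_arithmetic_operators; infer_instance

def pvWitness_add_without_arithmetic_operators : Int × Int := (3, 5)

def Spec_add_without_arithmetic_operators (a : Int) (b : Int) (out : Int) : Prop :=
  out = add_without_arithmetic_operators_alt a b
instance (a : Int) (b : Int) (out : Int) : Decidable (Spec_add_without_arithmetic_operators a b out) := by
  unfold Spec_add_without_arithmetic_operators; infer_instance

-- ===== CLAIM (what is proved, stated in full; the proofs are below) =====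
def Claim_equal_add_without_arithmetic_operators : Prop :=
  ∀ (a : Int) (b : Int), Dom_add_without_arithmetic_operators a b →
    Pre_add_without_arithmetic_operators a b →
    Spec_add_without_arithmetic_operators a b (add_without_arithmetic_operators a b)

-- ===== LEMMAS AND PROOFS =====

-- full-adder identity on natural numbers: m + n = (m XOR n) + 2 * (m AND n)
theorem pv_add_eq_xor_add_two_mul_and (m n : Nat) : m + n = (m ^^^ n) + 2 * (m &&& n) := by
  induction m using Nat.strong_induction_on generalizing n with
  | _ m ih =>
    rcases Nat.eq_zero_or_pos m with hm | hm
    · simp [hm]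
    · have hIH := ih (m / 2) (Nat.div_lt_self hm (by omega)) (n / 2)
      have hxd : (m ^^^ n) / 2 = m / 2 ^^^ n / 2 := Nat.xor_div_two
      have had : (m &&& n) / 2 = m / 2 &&& n / 2 := Nat.and_div_two
      have hxm := Nat.mod_two_eq_zero_or_one (m ^^^ n)
      have ham := Nat.mod_two_eq_zero_or_one (m &&& n)
      have hx2 : (m ^^^ n) % 2 = 1 ↔ ¬ (m % 2 = 1 ↔ n % 2 = 1) := Nat.xor_mod_two_eq_one
      have ha2 : (m &&& n) % 2 = 1 ↔ (m % 2 = 1 ∧ n % 2 = 1) := Nat.and_mod_two_eq_one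
      rcases Nat.mod_two_eq_zero_or_one m with h1 | h1 <;>
        rcases Nat.mod_two_eq_zero_or_one n with h2 | h2 <;>
        rw [h1, h2] at hx2 ha2 <;> omega

-- a power of two dividing n divides m AND n
theorem pv_two_pow_dvd_and (m n k : Nat) (h : 2 ^ k ∣ n) : 2 ^ k ∣ (m &&& n) := by
  rw [Nat.dvd_iff_mod_eq_zero] at h ⊢
  rw [Nat.and_mod_two_pow, h, Nat.and_zero]

-- nonnegative-integer shifts are the Nat shifts
theorem pv_natCast_shiftLeft (x s : Nat) : ((x : Int) <<< s : Int) = ((x <<< s : Nat) : Int) := rfl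
theorem pv_natCast_shiftRight (x s : Nat) : ((x : Int) >>> s : Int) = ((x >>> s : Nat) : Int) := rfl

-- A's loop computes m + n while 2^k divides the carry word and m + n < 2^(k+fuel)
theorem pv_loopA_eq (fuel : Nat) : ∀ (k m n : Nat), 2 ^ k ∣ n → m + n < 2 ^ (k + fuel) →
    pvLoopA fuel (m : Int) (n : Int) = ((m + n : Nat) : Int) := by
  induction fuel with
  | zero =>
    intro k m n hdvd hlt
    rw [Nat.add_zero] at hlt
    have hn : n = 0 := Nat.eq_zero_of_dvd_of_lt hdvd (by omega)
    simp [pvLoopA, hn]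
  | succ fuel ih =>
    intro k m n hdvd hlt
    by_cases hn : n = 0
    · simp [pvLoopA, hn]
    · have hne : (n : Int) ≠ 0 := by exact_mod_cast hn
      rw [pvLoopA, if_pos hne]
      simp only [PySem.Int.band_natCast, PySem.Int.bxor_natCast, pv_natCast_shiftLeft]
      have hsum : (m ^^^ n) + (m &&& n) <<< 1 = m + n := by
        rw [Nat.shiftLeft_eq]
        have := pv_add_eq_xor_add_two_mul_and m n
        omega
      have hdvd' : 2 ^ (k + 1) ∣ (m &&& n) <<< 1 := by
        rw [Nat.shiftLeft_eq, Nat.pow_succ]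
        exact Nat.mul_dvd_mul (pv_two_pow_dvd_and m n k hdvd) (by norm_num)
      have hlt' : (m ^^^ n) + (m &&& n) <<< 1 < 2 ^ (k + 1 + fuel) := by
        rw [hsum]
        have : k + 1 + fuel = k + (fuel + 1) := by omega
        rw [this]; exact hlt
      rw [ih (k + 1) (m ^^^ n) ((m &&& n) <<< 1) hdvd' hlt', hsum]

-- one-bit full-adder case analysis
theorem pv_bit_cases (a1 b1 c : Nat) (ha : a1 ≤ 1) (hb : b1 ≤ 1) (hc : c ≤ 1) :
    (a1 ^^^ b1 ^^^ c) + 2 * ((a1 &&& b1) ||| (a1 &&& c) ||| (b1 &&& c)) = a1 + b1 + c ∧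
    (a1 ^^^ b1 ^^^ c) ≤ 1 ∧ ((a1 &&& b1) ||| (a1 &&& c) ||| (b1 &&& c)) ≤ 1 := by
  interval_cases a1 <;> interval_cases b1 <;> interval_cases c <;> decide

-- OR-ing a bit into a result below 2^i is addition
theorem pv_or_bit (r s i : Nat) (hr : r < 2 ^ i) :
    r ||| s <<< i = r + s * 2 ^ i := by
  rw [Nat.shiftLeft_eq, Nat.or_comm, Nat.mul_comm s, ← Nat.two_pow_add_eq_or_of_lt hr s]
  omega

-- B's loop invariant: result holds the low i bits of m + n, carry the pending bit
theorem pv_loopB_eq (fuel : Nat) : ∀ (i r c m n : Nat), c ≤ 1 → r < 2 ^ i →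
    r + (c + m >>> i + n >>> i) * 2 ^ i = m + n →
    c + m >>> i + n >>> i < 2 ^ fuel →
    pvLoopB fuel (m : Int) (n : Int) (r : Int) (c : Int) i = ((m + n : Nat) : Int) := by
  induction fuel with
  | zero =>
    intro i r c m n hc hr hinv hlt
    rw [Nat.pow_zero] at hlt
    have hX : c + m >>> i + n >>> i = 0 := Nat.lt_one_iff.mp hlt
    rw [hX, Nat.zero_mul, Nat.add_zero] at hinv
    simp [pvLoopB, hinv]
  | succ fuel ih =>
    intro i r c m n hc hr hinv hlt
    by_cases hstop : m >>> i = 0 ∧ n >>> i = 0 ∧ c = 0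
    · rw [pvLoopB]
      have h1 : ((m : Int) >>> i) = 0 := by rw [pv_natCast_shiftRight, hstop.1]; rfl
      have h2 : ((n : Int) >>> i) = 0 := by rw [pv_natCast_shiftRight, hstop.2.1]; rfl
      have h3 : (c : Int) = 0 := by rw [hstop.2.2]; rfl
      rw [hstop.1, hstop.2.1, hstop.2.2] at hinv
      simp only [Nat.add_zero, Nat.zero_mul] at hinv
      simp only [h1, h2, h3, ne_eq, not_true_eq_false, or_self, if_false]
      exact_mod_cast hinv
    · rw [pvLoopB]
      have hcond : ((m : Int) >>> i) ≠ 0 ∨ ((n : Int) >>> i) ≠ 0 ∨ (c : Int) ≠ 0 := by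
        by_contra h
        simp only [not_or, not_ne_iff] at h
        rw [pv_natCast_shiftRight, pv_natCast_shiftRight] at h
        exact hstop ⟨by exact_mod_cast h.1, by exact_mod_cast h.2.1, by exact_mod_cast h.2.2⟩
      rw [if_pos hcond]
      simp only [pv_natCast_shiftRight]
      have hone : (1 : Int) = ((1 : Nat) : Int) := rfl
      rw [hone]
      simp only [PySem.Int.band_natCast, PySem.Int.bxor_natCast, PySem.Int.bor_natCast,
        pv_natCast_shiftLeft]
      -- names for the Nat quantities
      set A1 := m >>> i with hA1
      set B1 := n >>> i with hB1
      have ha1 : A1 &&& 1 ≤ 1 := by rw [Nat.and_one_is_mod]; omega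
      have hb1 : B1 &&& 1 ≤ 1 := by rw [Nat.and_one_is_mod]; omega
      obtain ⟨hfa, hs1, hc1⟩ := pv_bit_cases (A1 &&& 1) (B1 &&& 1) c ha1 hb1 hc
      set s := A1 &&& 1 ^^^ B1 &&& 1 ^^^ c with hs_def
      set c' := A1 &&& 1 &&& (B1 &&& 1) ||| (A1 &&& 1 &&& c) ||| (B1 &&& 1 &&& c) with hc'
      have hmA : m >>> (i + 1) = A1 / 2 := by rw [hA1, Nat.shiftRight_succ]
      have hmB : n >>> (i + 1) = B1 / 2 := by rw [hB1, Nat.shiftRight_succ]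
      have hA1m : A1 &&& 1 = A1 % 2 := Nat.and_one_is_mod A1
      have hB1m : B1 &&& 1 = B1 % 2 := Nat.and_one_is_mod B1
      have hor : r ||| s <<< i = r + s * 2 ^ i := pv_or_bit r s i hr
      have hr' : r ||| s <<< i < 2 ^ (i + 1) := by
        rw [hor, Nat.pow_succ]
        have : s * 2 ^ i ≤ 2 ^ i := by
          calc s * 2 ^ i ≤ 1 * 2 ^ i := Nat.mul_le_mul_right _ hs1
          _ = 2 ^ i := Nat.one_mul _
        omega
      have hinv' : (r ||| s <<< i) + (c' + m >>> (i + 1) + n >>> (i + 1)) * 2 ^ (i + 1)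
          = m + n := by
        rw [hor, hmA, hmB, Nat.pow_succ]
        have key : s + (c' + A1 / 2 + B1 / 2) * 2 = c + A1 + B1 := by omega
        calc r + s * 2 ^ i + (c' + A1 / 2 + B1 / 2) * (2 ^ i * 2)
            = r + (s + (c' + A1 / 2 + B1 / 2) * 2) * 2 ^ i := by ring
          _ = r + (c + A1 + B1) * 2 ^ i := by rw [key]
          _ = m + n := hinv
      have hlt' : c' + m >>> (i + 1) + n >>> (i + 1) < 2 ^ fuel := by
        rw [hmA, hmB]
        have h2p : 2 ^ (fuel + 1) = 2 * 2 ^ fuel := Nat.pow_succ'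
        omega
      exact ih (i + 1) (r ||| s <<< i) c' m n hc1 hr' hinv' hlt'

-- ===== VERDICT (by name: the statement is the Claim_ definition above) =====
theorem add_without_arithmetic_operators_spec : Claim_equal_add_without_arithmetic_operators := by
  intro a b hdom hpre
  unfold Spec_add_without_arithmetic_operators add_without_arithmetic_operators
    add_without_arithmetic_operators_alt
  obtain ⟨ha, hb⟩ := hpre
  have hdom' : a ≤ 2147483648 ∧ b ≤ 2147483648 := by
    unfold Dom_add_without_arithmetic_operators pvDomInt at hdom
    simp at hdom
    exact ⟨hdom.1.2, hdom.2.2⟩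
  set m := a.toNat with hm
  set n := b.toNat with hn
  have hma : (m : Int) = a := Int.toNat_of_nonneg ha
  have hnb : (n : Int) = b := Int.toNat_of_nonneg hb
  have hmle : m ≤ 2147483648 := by omega
  have hnle : n ≤ 2147483648 := by omega
  rw [← hma, ← hnb]
  have hA := pv_loopA_eq 64 0 m n (by simp) (by norm_num; omega)
  have hB := pv_loopB_eq 64 0 0 0 m n (by omega) (by norm_num)
    (by simp) (by norm_num; omega)
  have h0 : ((0 : Nat) : Int) = (0 : Int) := rfl
  rw [hA, ← h0, hB]
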